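-- pv_equiv track=rewrite | github.com/simonepenna/adibodyes | utility/lambda_fulfillment_check.py | check_size_difference
-- ===== SOURCE A (Python) =====
-- SIZE_ORDER = {'XXS': 0, 'XS': 1, 'S': 2, 'M': 3, 'L': 4, 'XL': 5, 'XXL': 6, '3XL': 7}
--
-- def check_size_difference(sizes):
--     """Controlla se ci sono almeno 2 taglie con differenza >= 2 (es. S + L, XS + M)"""
--     if len(sizes) < 2:
--         return False
--
--     # Converti taglie in numeri usando SIZE_ORDER
--     size_values = []
--     for size in sizes:
--         size_upper = size.upper().strip()
--         if size_upper in SIZE_ORDER: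
--             size_values.append(SIZE_ORDER[size_upper])
--
--     # Se abbiamo almeno 2 taglie valide, controlla differenza
--     if len(size_values) < 2:
--         return False
--
--     size_values.sort()
--     max_diff = size_values[-1] - size_values[0]
--
--     return max_diff >= 2
-- ===== SOURCE B (Python) =====
-- SIZE_ORDER = {'XXS': 0, 'XS': 1, 'S': 2, 'M': 3, 'L': 4, 'XL': 5, 'XXL': 6, '3XL': 7}
--
-- def check_size_difference(sizes):
--     """True iff two recognised sizes differ by >= 2; single pass tracking min/max."""
--     bounds = None
--     for size in sizes:
--         v = SIZE_ORDER.get(size.upper().strip())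
--         if v is not None:
--             if bounds is None:
--                 bounds = (v, v)
--             else:
--                 lo, hi = bounds
--                 bounds = (min(lo, v), max(hi, v))
--     return bounds is not None and bounds[1] - bounds[0] >= 2
-- ===== Notes on version B (the rewrite author's own statement) =====
-- stated objective: simpler
-- what changed: Replaces A's build-a-list + sort + index-the-ends computation with a single pass that folds a running (min,max) pair over the parsed sizes, with no intermediate list, no sort and no length guards.
import Mathlib
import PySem

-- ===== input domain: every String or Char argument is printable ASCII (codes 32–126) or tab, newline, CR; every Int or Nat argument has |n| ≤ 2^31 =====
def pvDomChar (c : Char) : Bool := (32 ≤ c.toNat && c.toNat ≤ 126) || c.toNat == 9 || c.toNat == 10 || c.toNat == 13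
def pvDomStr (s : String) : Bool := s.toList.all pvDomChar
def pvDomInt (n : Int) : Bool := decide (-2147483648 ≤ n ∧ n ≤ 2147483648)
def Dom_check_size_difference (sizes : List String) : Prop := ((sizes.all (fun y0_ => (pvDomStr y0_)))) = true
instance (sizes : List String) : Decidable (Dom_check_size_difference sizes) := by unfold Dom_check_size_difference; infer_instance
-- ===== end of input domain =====

-- B replaces A's build-a-list + sort + index-the-ends computation with a single
-- fold of a running (min, max) pair over the parsed sizes (objective: simpler).

-- ===== PORT A =====
def SIZE_ORDER : PySem.Dict String Int :=
  PySem.Dict.ofList [("XXS", 0), ("XS", 1), ("S", 2), ("M", 3), ("L", 4), ("XL", 5), ("XXL", 6), ("3XL", 7)]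

def check_size_difference (sizes : List String) : Bool :=
  if sizes.length < 2 then false
  else
    let size_values : List Int := sizes.foldl (fun acc size =>
      let size_upper := PySem.Str.strip (PySem.Str.upper size)
      if SIZE_ORDER.contains size_upper then acc ++ [SIZE_ORDER.getD size_upper 0] else acc) []
    if size_values.length < 2 then false
    else
      let sv := PySem.List.sorted size_values (fun x => x) false
      let max_diff := PySem.List.pyGetD sv (-1) 0 - PySem.List.pyGetD sv 0 0
      decide (max_diff ≥ 2)

-- ===== PORT B =====
def check_size_difference_alt (sizes : List String) : Bool :=
  let bounds := sizes.foldl (fun acc size =>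
    match SIZE_ORDER.get? (PySem.Str.strip (PySem.Str.upper size)) with
    | none => acc
    | some v =>
      match acc with
      | none => some (v, v)
      | some (lo, hi) => some (min lo v, max hi v)) (none : Option (Int × Int))
  match bounds with
  | none => false
  | some (lo, hi) => decide (hi - lo ≥ 2)

-- ===== PRECONDITION & SPEC =====
def Spec_check_size_difference (sizes : List String) (out : Bool) : Prop := out = check_size_difference_alt sizes
instance (sizes : List String) (out : Bool) : Decidable (Spec_check_size_difference sizes out) := by unfold Spec_check_size_difference; infer_instance

-- ===== CLAIM (what is proved, stated in full; the proofs are below) =====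
def Claim_equal_check_size_difference : Prop := ∀ (sizes : List String), Dom_check_size_difference sizes → Spec_check_size_difference sizes (check_size_difference sizes)

-- ===== LEMMAS AND PROOFS =====

/-- The parsed value of one input string (shared reading of both loops). -/
def pvParse (s : String) : Option Int :=
  SIZE_ORDER.get? (PySem.Str.strip (PySem.Str.upper s))

/-- A's accumulation loop builds `init ++ filterMap pvParse`. -/
theorem foldA_eq (sizes : List String) (init : List Int) :
    sizes.foldl (fun acc size =>
      let size_upper := PySem.Str.strip (PySem.Str.upper size)
      if SIZE_ORDER.contains size_upper then acc ++ [SIZE_ORDER.getD size_upper 0] else acc) init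
    = init ++ sizes.filterMap pvParse := by
  induction sizes generalizing init with
  | nil => simp
  | cons s t ih =>
    simp only [List.foldl_cons, List.filterMap_cons]
    have hc : SIZE_ORDER.contains (PySem.Str.strip (PySem.Str.upper s))
        = (pvParse s).isSome := by
      rw [PySem.Dict.contains_eq_isSome_get?]; rfl
    cases hp : pvParse s with
    | none => simp [hc, hp, ih]
    | some v =>
      have hp' : SIZE_ORDER.get? (PySem.Str.strip (PySem.Str.upper s)) = some v := hp
      have hd : SIZE_ORDER.getD (PySem.Str.strip (PySem.Str.upper s)) 0 = v :=
        PySem.Dict.getD_of_get?_eq_some SIZE_ORDER 0 hp'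
      simp [hc, hp, hd, ih]

/-- B's fold only depends on the parsed values. -/
theorem foldB_eq (sizes : List String) (acc : Option (Int × Int)) :
    sizes.foldl (fun acc size =>
      match SIZE_ORDER.get? (PySem.Str.strip (PySem.Str.upper size)) with
      | none => acc
      | some v =>
        match acc with
        | none => some (v, v)
        | some (lo, hi) => some (min lo v, max hi v)) acc
    = (sizes.filterMap pvParse).foldl (fun acc v =>
        match acc with
        | none => some (v, v)
        | some (lo, hi) => some (min lo v, max hi v)) acc := by
  induction sizes generalizing acc with
  | nil => rfl
  | cons s t ih =>
    simp only [List.foldl_cons, List.filterMap_cons]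
    cases hp : pvParse s with
    | none => simp only [pvParse] at hp; rw [hp]; exact ih acc
    | some v => simp only [pvParse] at hp; rw [hp]; cases acc <;> simp [ih]

/-- The min/max fold from a seeded pair computes the running min and max. -/
theorem foldMM (l : List Int) (lo hi : Int) :
    l.foldl (fun acc v =>
        match acc with
        | none => some (v, v)
        | some (lo, hi) => some (min lo v, max hi v)) (some (lo, hi))
    = some (l.foldl min lo, l.foldl max hi) := by
  induction l generalizing lo hi with
  | nil => rfl
  | cons v t ih => simp [ih]

/-- Every member of a ≤-sorted list is at most its last element. -/
theorem mem_le_getLast (l : List Int) (h : l.Pairwise (· ≤ ·)) (hne : l ≠ [])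
    (y : Int) (hy : y ∈ l) : y ≤ l.getLast hne := by
  obtain ⟨p, hp, rfl⟩ := List.mem_iff_getElem.mp hy
  rw [List.getLast_eq_getElem]
  by_cases hpe : p = l.length - 1
  · subst hpe; exact le_rfl
  · exact List.pairwise_iff_getElem.mp h p (l.length - 1) (by omega) (by omega) (by omega)

/-- The ends of the sorted list are the running min and max. -/
theorem sorted_ends (a : Int) (r : List Int) :
    PySem.List.pyGetD (PySem.List.sorted (a :: r) (fun x => x) false) 0 0 = r.foldl min a ∧
    PySem.List.pyGetD (PySem.List.sorted (a :: r) (fun x => x) false) (-1) 0 = r.foldl max a := by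
  set vals := a :: r with hv
  set sv := PySem.List.sorted vals (fun x => x) false with hsv
  have hne : sv ≠ [] := by
    rw [hsv, Ne, PySem.List.sorted_eq_nil_iff]; simp [hv]
  have hminspec := PySem.List.min?_id_cons (x := a) (t := r)
  have hmaxspec := PySem.List.max?_id_cons (x := a) (t := r)
  constructor
  · -- head = running min
    cases hs : sv with
    | nil => exact absurd hs hne
    | cons m srest =>
      have hmle : ∀ y ∈ vals, m ≤ y := by
        intro y hy
        simpa using PySem.List.key_head_sorted_le vals (fun x => x) (hsv.symm.trans hs) y hy
      have hmmem : m ∈ vals := by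
        rw [← PySem.List.mem_sorted vals (fun x => x) false, ← hsv, hs]
        exact List.mem_cons_self
      have hfmem : r.foldl min a ∈ vals := PySem.List.min?_mem hminspec
      have hfle : ∀ y ∈ vals, r.foldl min a ≤ y := by
        intro y hy; simpa using PySem.List.min?_isMin hminspec y hy
      rw [PySem.List.pyGetD_zero_cons]
      exact le_antisymm (hmle _ hfmem) (hfle _ hmmem)
  · -- last = running max
    rw [PySem.List.pyGetD_neg_one sv 0 hne]
    have hpw : sv.Pairwise (· ≤ ·) := by
      simpa using PySem.List.sorted_pairwise vals (fun x => x)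
    have hlmem : sv.getLast hne ∈ vals := by
      rw [← PySem.List.mem_sorted vals (fun x => x) false, ← hsv]
      exact List.getLast_mem hne
    have hfmem : r.foldl max a ∈ sv := by
      rw [hsv, PySem.List.mem_sorted vals (fun x => x) false]
      exact PySem.List.max?_mem hmaxspec
    have hfge : ∀ y ∈ vals, y ≤ r.foldl max a := by
      intro y hy; simpa using PySem.List.max?_isMax hmaxspec y hy
    exact le_antisymm (hfge _ hlmem) (mem_le_getLast sv hpw hne _ hfmem)

theorem check_size_difference_eq (sizes : List String) :
    check_size_difference sizes = check_size_difference_alt sizes := by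
  unfold check_size_difference check_size_difference_alt
  simp only [foldA_eq, foldB_eq, List.nil_append]
  cases hv : sizes.filterMap pvParse with
  | nil => simp
  | cons a r =>
    cases r with
    | nil => simp
    | cons b t =>
      have hlen : 2 ≤ sizes.length := by
        have := List.length_filterMap_le pvParse sizes
        rw [hv] at this; simp at this; omega
      have hends := sorted_ends a (b :: t)
      simp only [List.foldl_cons, foldMM]
      rw [if_neg (by omega), if_neg (by simp), hends.1, hends.2]
      simp [List.foldl_cons]

-- ===== VERDICT (by name: the statement is the Claim_ definition above) =====
theorem check_size_difference_spec : Claim_equal_check_size_difference := by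
  intro sizes _
  exact check_size_difference_eq sizes
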